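-- pv_equiv track=rewrite | github.com/CallumMcMahon/Dobble-Computer-Vision | tkinter_app.py | conv_params
-- ===== SOURCE A (Python) =====
-- def conv_params(in_size, out_size):
--     filters = [3, 2, 5, 4]
--     strides = [1, 2, 3]  # max_stride = 3
--     pads = [0, 1, 2, 3]  # max pad
--
--     if out_size == 1:
--         return 1, 0, in_size
--
--     for filter_size in filters:
--         for pad in pads:
--             for stride in strides:
--                 if ((out_size - 1) * stride == (in_size - filter_size) + 2 * pad):
--                     return stride, pad, filter_size
--     return None, None, None
-- ===== SOURCE B (Python) =====
-- def conv_params(in_size, out_size):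
--     if out_size == 1:
--         return 1, 0, in_size
--
--     d = out_size - 1
--     # flat candidate list in the original priority order: filters [3,2,5,4] outer, pads [0,1,2,3] inner
--     candidates = [(f, p) for f in [3, 2, 5, 4] for p in [0, 1, 2, 3]]
--     for f, p in candidates:
--         q, r = divmod((in_size - f) + 2 * p, d)
--         if r == 0 and 1 <= q <= 3:
--             return q, p, f
--     return None, None, None
-- ===== Notes on version B (the rewrite author's own statement) =====
-- stated objective: simpler
-- what changed: The three nested loops are replaced by a single pass over a flat (filter,pad) candidate list, with the stride obtained in closed form via divmod instead of scanned; first-match priority order is preserved.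
import Mathlib
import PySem

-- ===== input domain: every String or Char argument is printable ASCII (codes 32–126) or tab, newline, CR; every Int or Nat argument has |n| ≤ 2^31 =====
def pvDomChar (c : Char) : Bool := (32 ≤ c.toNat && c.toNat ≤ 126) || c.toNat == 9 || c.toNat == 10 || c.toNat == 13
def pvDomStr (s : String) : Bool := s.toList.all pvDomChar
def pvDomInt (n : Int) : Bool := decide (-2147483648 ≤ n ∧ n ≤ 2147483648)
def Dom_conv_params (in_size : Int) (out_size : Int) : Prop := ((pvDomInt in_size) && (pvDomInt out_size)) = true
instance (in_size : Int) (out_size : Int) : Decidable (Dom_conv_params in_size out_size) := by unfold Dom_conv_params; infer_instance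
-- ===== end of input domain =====

-- B flattens A's three nested loops into one pass over a flat (filter,pad) candidate list with the stride obtained in closed form by divmod (objective: simpler); same first-match priority order.

-- ===== PORT A =====
-- inner 'for stride in strides' loop with early return
def convA_strideLoop (in_size out_size filter_size pad : Int) : List Int → Option (Int × Int × Int)
  | [] => none
  | s :: rest =>
    if (out_size - 1) * s = (in_size - filter_size) + 2 * pad then some (s, pad, filter_size)
    else convA_strideLoop in_size out_size filter_size pad rest

-- 'for pad in pads' loop
def convA_padLoop (in_size out_size filter_size : Int) : List Int → Option (Int × Int × Int)
  | [] => none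
  | p :: rest =>
    match convA_strideLoop in_size out_size filter_size p [1, 2, 3] with
    | some r => some r
    | none => convA_padLoop in_size out_size filter_size rest

-- 'for filter_size in filters' loop
def convA_filterLoop (in_size out_size : Int) : List Int → Option (Int × Int × Int)
  | [] => none
  | f :: rest =>
    match convA_padLoop in_size out_size f [0, 1, 2, 3] with
    | some r => some r
    | none => convA_filterLoop in_size out_size rest

def conv_params (in_size : Int) (out_size : Int) : Option Int × Option Int × Option Int :=
  if out_size = 1 then (some 1, some 0, some in_size)
  else
    match convA_filterLoop in_size out_size [3, 2, 5, 4] with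
    | some (s, p, f) => (some s, some p, some f)
    | none => (none, none, none)

-- ===== PORT B =====
-- Source B's loop body: q, r = divmod((in_size - f) + 2*p, d); hit when r == 0 and 1 <= q <= 3
def convB_check (in_size d : Int) (fp : Int × Int) : Option (Int × Int × Int) :=
  let t := (in_size - fp.1) + 2 * fp.2
  let q := PySem.Int.floordiv t d
  let r := PySem.Int.mod t d
  if r = 0 ∧ 1 ≤ q ∧ q ≤ 3 then some (q, fp.2, fp.1) else none

-- the comprehension 'candidates = [(f, p) for f in [3,2,5,4] for p in [0,1,2,3]]'
def convB_candidates : List (Int × Int) :=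
  [3, 2, 5, 4].flatMap (fun f => [0, 1, 2, 3].map (fun p => (f, p)))

def conv_params_alt (in_size : Int) (out_size : Int) : Option Int × Option Int × Option Int :=
  if out_size = 1 then (some 1, some 0, some in_size)
  else
    match convB_candidates.findSome? (convB_check in_size (out_size - 1)) with
    | some (s, p, f) => (some s, some p, some f)
    | none => (none, none, none)

-- ===== PRECONDITION & SPEC =====
def Spec_conv_params (in_size : Int) (out_size : Int) (out : Option Int × Option Int × Option Int) : Prop := out = conv_params_alt in_size out_size
instance (in_size : Int) (out_size : Int) (out : Option Int × Option Int × Option Int) : Decidable (Spec_conv_params in_size out_size out) := by unfold Spec_conv_params; infer_instance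

-- ===== CLAIM =====
def Claim_equal_conv_params : Prop := ∀ (in_size : Int) (out_size : Int), Dom_conv_params in_size out_size → Spec_conv_params in_size out_size (conv_params in_size out_size)

-- ===== LEMMAS AND PROOFS =====

-- A's 3-step stride scan equals B's closed-form divmod check (for out_size ≠ 1)
lemma check_eq (i o f p : Int) (ho : o ≠ 1) :
    convA_strideLoop i o f p [1, 2, 3] = convB_check i (o - 1) (f, p) := by
  have hd : o - 1 ≠ 0 := by omega
  simp only [convA_strideLoop, convB_check]
  set t := i - f + 2 * p with ht
  set d := o - 1 with hdd
  by_cases hdvd : d ∣ t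
  · obtain ⟨q, hq⟩ := hdvd
    have hmod : PySem.Int.mod t d = 0 := (PySem.Int.mod_eq_zero_iff_dvd t d).mpr ⟨q, hq⟩
    have hfd : PySem.Int.floordiv t d = q := by
      have h1 := PySem.Int.floordiv_mul_add_mod t d
      rw [hmod, add_zero] at h1
      have h2 : PySem.Int.floordiv t d * d = q * d := by rw [h1, hq, mul_comm]
      exact mul_right_cancel₀ hd h2
    have hiff : ∀ s : Int, (d * s = t) ↔ s = q := by
      intro s
      constructor
      · intro h; exact mul_left_cancel₀ hd (h.trans hq)
      · rintro rfl; exact hq.symm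
    have hiff1 : (d = t) ↔ (1 : Int) = q := by simpa using hiff 1
    rw [hmod, hfd]
    rcases eq_or_ne q 1 with rfl | h1
    · simp [hiff1]
    rcases eq_or_ne q 2 with rfl | h2
    · simp [hiff, hiff1]
    rcases eq_or_ne q 3 with rfl | h3
    · simp [hiff, hiff1]
    have hno : ¬ (1 ≤ q ∧ q ≤ 3) := by omega
    simp [hiff, hiff1, hno, Ne.symm h1, Ne.symm h2, Ne.symm h3]
  · have hmod : PySem.Int.mod t d ≠ 0 := fun h => hdvd ((PySem.Int.mod_eq_zero_iff_dvd t d).mp h)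
    have hs : ∀ s : Int, d * s ≠ t := fun s h => hdvd ⟨s, h.symm⟩
    have hs1 : d ≠ t := by simpa using hs 1
    simp [hs, hs1, hmod]

-- A's pad loop equals a findSome? pass over the paired-up pad list
lemma pad_eq (i o f : Int) (ho : o ≠ 1) (ps : List Int) :
    convA_padLoop i o f ps
      = (ps.map (fun p => (f, p))).findSome? (convB_check i (o - 1)) := by
  induction ps with
  | nil => rfl
  | cons p rest ih =>
    simp only [convA_padLoop, List.map_cons, List.findSome?_cons, check_eq i o f p ho, ih]
    cases convB_check i (o - 1) (f, p) <;> rfl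

-- A's filter loop equals a findSome? pass over the flattened candidate list
lemma filt_eq (i o : Int) (ho : o ≠ 1) (fs : List Int) :
    convA_filterLoop i o fs
      = (fs.flatMap (fun f => [0, 1, 2, 3].map (fun p => (f, p)))).findSome? (convB_check i (o - 1)) := by
  induction fs with
  | nil => rfl
  | cons f rest ih =>
    simp only [convA_filterLoop, List.flatMap_cons, List.findSome?_append, pad_eq i o f ho, ih]
    cases ([0, 1, 2, 3].map (fun p => ((f : Int), p))).findSome? (convB_check i (o - 1)) <;> rfl

-- ===== VERDICT =====
theorem conv_params_spec : Claim_equal_conv_params := by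
  intro i o _
  unfold Spec_conv_params conv_params conv_params_alt
  by_cases ho : o = 1
  · simp [ho]
  · simp only [ho, if_false, convB_candidates, filt_eq i o ho]
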